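-- pv_equiv track=rewrite | github.com/Viktor-Butkovich/Scramble-for-Africa-game | Scramble for Africa.py | make_resource_list
-- ===== SOURCE A (Python) =====
-- def make_resource_list(terrain):
--     resource_list = []
--     if terrain == 'clear':
--         for i in range(135):
--             resource_list.append('none')
--         for i in range(5):
--             resource_list.append('ivory')
--         for i in range(20):
--             resource_list.append('natives')
--
--     elif terrain == 'mountain':
--         for i in range(135):
--             resource_list.append('none')
--         resource_list.append('diamonds')
--         for i in range(2):
--             resource_list.append('gold')
--         for i in range(4):
--             resource_list.append('coffee')
--         for i in range(4):
--             resource_list.append('copper')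
--         for i in range(4):
--             resource_list.append('iron')
--         for i in range(10):
--             resource_list.append('natives')
--
--     elif terrain == 'hills':
--         for i in range(135):
--             resource_list.append('none')
--         resource_list.append('diamonds')
--         for i in range(2):
--             resource_list.append('gold')
--         for i in range(4):
--             resource_list.append('coffee')
--         for i in range(4):
--             resource_list.append('copper')
--         for i in range(4):
--             resource_list.append('iron')
--         for i in range(10):
--             resource_list.append('natives')
--     elif terrain == 'jungle':
--         for i in range(125):
--             resource_list.append('none')
--         resource_list.append('diamonds')
--         for i in range(6):
--             resource_list.append('rubber')
--         resource_list.append('coffee')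
--         for i in range(6):
--             resource_list.append('exotic wood')
--         for i in range(6):
--             resource_list.append('fruit')
--         for i in range(15):
--             resource_list.append('natives')
--     elif terrain == 'swamp':
--         for i in range(130):
--             resource_list.append('none')
--         for i in range(4):
--             resource_list.append('ivory')
--         for i in range(4):
--             resource_list.append('rubber')
--         resource_list.append('coffee')
--         for i in range(4):
--             resource_list.append('exotic wood')
--         for i in range(2):
--             resource_list.append('fruit')
--         for i in range(15):
--             resource_list.append('natives')
--     elif terrain == 'desert':
--         for i in range(140):
--             resource_list.append('none')
--         for i in range(2):
--             resource_list.append('diamonds')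
--         resource_list.append('gold')
--         resource_list.append('ivory')
--         for i in range(2):
--             resource_list.append('fruit')
--         for i in range(2):
--             resource_list.append('copper')
--         for i in range(2):
--             resource_list.append('iron')
--         for i in range(10):
--             resource_list.append('natives')
--     else:
--         resource_list.append('none')
--     return(resource_list)
-- ===== SOURCE B (Python) =====
-- _RESOURCE_TABLE = {
--     'clear': [(135, 'none'), (5, 'ivory'), (20, 'natives')],
--     'mountain': [(135, 'none'), (1, 'diamonds'), (2, 'gold'), (4, 'coffee'),
--                  (4, 'copper'), (4, 'iron'), (10, 'natives')],
--     'hills': [(135, 'none'), (1, 'diamonds'), (2, 'gold'), (4, 'coffee'),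
--               (4, 'copper'), (4, 'iron'), (10, 'natives')],
--     'jungle': [(125, 'none'), (1, 'diamonds'), (6, 'rubber'), (1, 'coffee'),
--                (6, 'exotic wood'), (6, 'fruit'), (15, 'natives')],
--     'swamp': [(130, 'none'), (4, 'ivory'), (4, 'rubber'), (1, 'coffee'),
--               (4, 'exotic wood'), (2, 'fruit'), (15, 'natives')],
--     'desert': [(140, 'none'), (2, 'diamonds'), (1, 'gold'), (1, 'ivory'),
--                (2, 'fruit'), (2, 'copper'), (2, 'iron'), (10, 'natives')],
-- }
--
-- def make_resource_list(terrain):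
--     pairs = _RESOURCE_TABLE.get(terrain)
--     if pairs is None:
--         return ['none']
--     out = []
--     for count, resource in pairs:
--         out.extend([resource] * count)
--     return out
-- ===== Notes on version B (the rewrite author's own statement) =====
-- stated objective: simpler
-- what changed: Replaced the per-terrain branch chain of append loops with a single terrain-to-(count,resource) table lookup flattened by one loop, defaulting to ['none'] for unknown terrain.
import Mathlib
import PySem

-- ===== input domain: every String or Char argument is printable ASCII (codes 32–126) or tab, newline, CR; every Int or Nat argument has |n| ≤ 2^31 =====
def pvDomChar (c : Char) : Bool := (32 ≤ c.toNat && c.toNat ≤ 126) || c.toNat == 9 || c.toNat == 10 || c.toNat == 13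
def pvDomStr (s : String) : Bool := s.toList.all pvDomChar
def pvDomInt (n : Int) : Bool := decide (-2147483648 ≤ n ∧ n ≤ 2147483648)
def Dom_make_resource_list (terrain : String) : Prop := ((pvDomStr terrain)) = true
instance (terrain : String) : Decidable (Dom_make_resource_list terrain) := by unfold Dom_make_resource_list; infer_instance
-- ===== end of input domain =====

set_option maxRecDepth 4000


-- B replaces A's branch-per-terrain append loops with one table lookup plus a flattening loop (simpler).

-- ===== PORT A =====
-- literal port: each 'for i in range(n): resource_list.append(x)' is a fold over pyRange appending x
def pvAppendN (acc : List String) (n : Int) (x : String) : List String :=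
  (PySem.List.pyRange 0 n 1).foldl (fun a _ => a ++ [x]) acc

def make_resource_list (terrain : String) : List String :=
  let resource_list : List String := []
  if terrain == "clear" then
    let resource_list := pvAppendN resource_list 135 "none"
    let resource_list := pvAppendN resource_list 5 "ivory"
    pvAppendN resource_list 20 "natives"
  else if terrain == "mountain" then
    let resource_list := pvAppendN resource_list 135 "none"
    let resource_list := resource_list ++ ["diamonds"]
    let resource_list := pvAppendN resource_list 2 "gold"
    let resource_list := pvAppendN resource_list 4 "coffee"
    let resource_list := pvAppendN resource_list 4 "copper"
    let resource_list := pvAppendN resource_list 4 "iron"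
    pvAppendN resource_list 10 "natives"
  else if terrain == "hills" then
    let resource_list := pvAppendN resource_list 135 "none"
    let resource_list := resource_list ++ ["diamonds"]
    let resource_list := pvAppendN resource_list 2 "gold"
    let resource_list := pvAppendN resource_list 4 "coffee"
    let resource_list := pvAppendN resource_list 4 "copper"
    let resource_list := pvAppendN resource_list 4 "iron"
    pvAppendN resource_list 10 "natives"
  else if terrain == "jungle" then
    let resource_list := pvAppendN resource_list 125 "none"
    let resource_list := resource_list ++ ["diamonds"]
    let resource_list := pvAppendN resource_list 6 "rubber"
    let resource_list := resource_list ++ ["coffee"]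
    let resource_list := pvAppendN resource_list 6 "exotic wood"
    let resource_list := pvAppendN resource_list 6 "fruit"
    pvAppendN resource_list 15 "natives"
  else if terrain == "swamp" then
    let resource_list := pvAppendN resource_list 130 "none"
    let resource_list := pvAppendN resource_list 4 "ivory"
    let resource_list := pvAppendN resource_list 4 "rubber"
    let resource_list := resource_list ++ ["coffee"]
    let resource_list := pvAppendN resource_list 4 "exotic wood"
    let resource_list := pvAppendN resource_list 2 "fruit"
    pvAppendN resource_list 15 "natives"
  else if terrain == "desert" then
    let resource_list := pvAppendN resource_list 140 "none"
    let resource_list := pvAppendN resource_list 2 "diamonds"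
    let resource_list := resource_list ++ ["gold"]
    let resource_list := resource_list ++ ["ivory"]
    let resource_list := pvAppendN resource_list 2 "fruit"
    let resource_list := pvAppendN resource_list 2 "copper"
    let resource_list := pvAppendN resource_list 2 "iron"
    pvAppendN resource_list 10 "natives"
  else
    resource_list ++ ["none"]

-- ===== PORT B =====
def pvResourceTable : List (String × List (Nat × String)) :=
  [("clear", [(135, "none"), (5, "ivory"), (20, "natives")]),
   ("mountain", [(135, "none"), (1, "diamonds"), (2, "gold"), (4, "coffee"),
                 (4, "copper"), (4, "iron"), (10, "natives")]),
   ("hills", [(135, "none"), (1, "diamonds"), (2, "gold"), (4, "coffee"),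
              (4, "copper"), (4, "iron"), (10, "natives")]),
   ("jungle", [(125, "none"), (1, "diamonds"), (6, "rubber"), (1, "coffee"),
               (6, "exotic wood"), (6, "fruit"), (15, "natives")]),
   ("swamp", [(130, "none"), (4, "ivory"), (4, "rubber"), (1, "coffee"),
              (4, "exotic wood"), (2, "fruit"), (15, "natives")]),
   ("desert", [(140, "none"), (2, "diamonds"), (1, "gold"), (1, "ivory"),
               (2, "fruit"), (2, "copper"), (2, "iron"), (10, "natives")])]

def pvFlatten (pairs : List (Nat × String)) : List String :=
  pairs.foldl (fun out p => out ++ List.replicate p.1 p.2) []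

def make_resource_list_alt (terrain : String) : List String :=
  match List.lookup terrain pvResourceTable with
  | none => ["none"]
  | some pairs => pvFlatten pairs

-- ===== PRECONDITION & SPEC =====
def Spec_make_resource_list (terrain : String) (out : List String) : Prop := out = make_resource_list_alt terrain
instance (terrain : String) (out : List String) : Decidable (Spec_make_resource_list terrain out) := by unfold Spec_make_resource_list; infer_instance

-- ===== CLAIM (what is proved, stated in full; the proofs are below) =====
def Claim_equal_make_resource_list : Prop := ∀ (terrain : String), Dom_make_resource_list terrain → Spec_make_resource_list terrain (make_resource_list terrain)

-- ===== LEMMAS AND PROOFS =====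

-- ===== VERDICT (by name: the statement is the Claim_ definition above) =====
theorem make_resource_list_spec : Claim_equal_make_resource_list := by
  intro terrain _
  unfold Spec_make_resource_list make_resource_list make_resource_list_alt
  by_cases h1 : terrain = "clear"
  · subst h1; decide
  · by_cases h2 : terrain = "mountain"
    · subst h2; decide
    · by_cases h3 : terrain = "hills"
      · subst h3; decide
      · by_cases h4 : terrain = "jungle"
        · subst h4; decide
        · by_cases h5 : terrain = "swamp"
          · subst h5; decide
          · by_cases h6 : terrain = "desert"
            · subst h6; decide
            · have e1 : (terrain == "clear") = false := by simp [h1]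
              have e2 : (terrain == "mountain") = false := by simp [h2]
              have e3 : (terrain == "hills") = false := by simp [h3]
              have e4 : (terrain == "jungle") = false := by simp [h4]
              have e5 : (terrain == "swamp") = false := by simp [h5]
              have e6 : (terrain == "desert") = false := by simp [h6]
              simp [pvResourceTable, List.lookup, e1, e2, e3, e4, e5, e6]
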